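-- pv_equiv track=rewrite | github.com/pypi-data/pypi-mirror-374 | packages/commit-for-free/commit_for_free-1.1.5-py3-none-any.whl/c4f/_purifier.py | explanatory_message
-- ===== SOURCE A (Python) =====
-- def explanatory_message(message: str) -> str:
--     """Remove explanatory sections from commit messages.
--
--     Removes sections that start with markers like "explanation:" or "note:".
--
--     Args:
--         message: The commit message to clean.
--
--     Returns:
--         str: The message without explanatory sections.
--     """
--     explanatory_markers = [
--         "explanation:",
--         "explanation of changes:",
--         "note:",
--         "notes:",
--         "this commit message",
--         "i hope this helps",
--         "please let me know",
--     ]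
--
--     for marker in explanatory_markers:
--         if marker in message.lower():
--             parts = message.lower().split(marker)
--             message = parts[0].strip()
--
--     return message
-- ===== SOURCE B (Python) =====
-- def explanatory_message(message: str) -> str:
--     """Remove explanatory sections from commit messages.
--
--     Cuts the message at the earliest occurrence of any explanatory marker
--     (case-insensitive) and strips the result; a message without markers is
--     returned unchanged.
--     """
--     markers = [
--         "explanation:",
--         "explanation of changes:",
--         "note:",
--         "notes:",
--         "this commit message",
--         "i hope this helps",
--         "please let me know",
--     ]
--     low = message.lower()
--     positions = [p for p in (low.find(marker) for marker in markers) if p != -1]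
--     if not positions:
--         return message
--     return low[:min(positions)].strip()
-- ===== Notes on version B (the rewrite author's own statement) =====
-- stated objective: simpler
-- what changed: A repeatedly lowers, splits and strips the message once per matching marker; B lowers once, collects each marker's first-occurrence position, and does a single slice+strip at the earliest one (returning the message unchanged when no marker occurs).
-- intended difference: On messages where the first occurrence of 'this commit message' in the lowered text is immediately continued, sharing its final 'e', by an 'explanation...' marker (the text contains 'this commit messagexplanation:' or 'this commit messagexplanation of changes:' there) and no marker's first occurrence ends at or before that shared position, A cuts only at the inner 'explanation...' marker and returns text still ending in the truncated fragment 'this commit messag', while B cuts at the earliest marker occurrence and removes the whole explanatory tail, which is what the function is for. — e.g. on explanatory_message("this commit messagexplanation:"): A returns "this commit messag", B returns ""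
import Mathlib
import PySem

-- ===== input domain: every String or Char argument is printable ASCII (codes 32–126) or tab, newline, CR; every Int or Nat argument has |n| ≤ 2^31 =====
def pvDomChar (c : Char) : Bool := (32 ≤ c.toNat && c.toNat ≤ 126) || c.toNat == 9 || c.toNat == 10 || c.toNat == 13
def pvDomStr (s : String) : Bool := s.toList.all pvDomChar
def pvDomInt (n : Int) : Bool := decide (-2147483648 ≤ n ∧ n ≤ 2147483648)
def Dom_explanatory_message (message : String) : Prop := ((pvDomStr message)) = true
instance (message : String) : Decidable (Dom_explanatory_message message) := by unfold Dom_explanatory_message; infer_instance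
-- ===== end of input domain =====

-- B cuts once at the earliest marker occurrence instead of A's repeated lower/split/strip mutation; objective: simpler.

-- the marker list, shared data of both implementations
def pvMarkers : List String :=
  ["explanation:", "explanation of changes:", "note:", "notes:",
   "this commit message", "i hope this helps", "please let me know"]

-- ===== PORT A =====
-- literal port of A: for each marker, if it occurs in the lowered current message,
-- replace the message by the stripped first piece of the split.
-- (parts[0] is ported as .headD "": split with a nonempty separator always returns a nonempty list)
def explanatory_message (message : String) : String :=
  pvMarkers.foldl (fun msg marker =>
    if PySem.Str.isIn marker (PySem.Str.lower msg) then
      PySem.Str.strip (((PySem.Str.split? (PySem.Str.lower msg) marker).getD []).headD "")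
    else msg) message

-- ===== PORT B =====
-- port of B: lower once, collect each marker's first-occurrence position,
-- one slice+strip at the minimum (min over the nonempty position list = PySem.List.min?;
-- the none branch is Python's 'if not positions: return message')
def explanatory_message_alt (message : String) : String :=
  let low := PySem.Str.lower message
  let positions := (pvMarkers.map (fun marker => PySem.Str.find low marker)).filter (fun p => p != -1)
  match PySem.List.min? positions (fun p => p) with
  | none => message
  | some c => PySem.Str.strip (PySem.Str.slice low none (some c))

-- ===== PRECONDITION & SPEC =====
-- On messages where the first occurrence of "this commit message" shares its final 'e' with the
-- start of an "explanation…" marker (the lowered text continues there as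
-- "this commit messagexplanation:" or "this commit messagexplanation of changes:") and no marker's
-- first occurrence ends at or before that shared position, A cuts only at the inner "explanation…"
-- marker and returns text still ending in the truncated fragment "this commit messag", while B cuts
-- at the earliest marker occurrence and removes the whole explanatory tail, which is what the
-- function is for.
def D_explanatory_message (message : String) : Prop :=
  0 ≤ PySem.Chars.find (PySem.Chars.lower message.toList) "this commit message".toList ∧
  ("this commit messagexplanation:".toList <+: (PySem.Chars.lower message.toList).drop
      (PySem.Chars.find (PySem.Chars.lower message.toList) "this commit message".toList).toNat ∨
   "this commit messagexplanation of changes:".toList <+: (PySem.Chars.lower message.toList).drop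
      (PySem.Chars.find (PySem.Chars.lower message.toList) "this commit message".toList).toNat) ∧
  ∀ m ∈ pvMarkers, PySem.Chars.find (PySem.Chars.lower message.toList) m.toList = -1 ∨
    PySem.Chars.find (PySem.Chars.lower message.toList) "this commit message".toList + 18 <
      PySem.Chars.find (PySem.Chars.lower message.toList) m.toList + (m.toList.length : Int)
instance (message : String) : Decidable (D_explanatory_message message) := by
  unfold D_explanatory_message; infer_instance

def Spec_explanatory_message (message : String) (out : String) : Prop :=
  ¬ D_explanatory_message message → out = explanatory_message_alt message
instance (message : String) (out : String) : Decidable (Spec_explanatory_message message out) := by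
  unfold Spec_explanatory_message; infer_instance

def pvDiffWitness_explanatory_message : String := "this commit messagexplanation:"
def pvDiffWitnessOut_explanatory_message : String × String := ("this commit messag", "")

-- ===== CLAIM (what is proved, stated in full; the proofs are below) =====
def Claim_unchanged_explanatory_message : Prop := ∀ (message : String), Dom_explanatory_message message → Spec_explanatory_message message (explanatory_message message)
def Claim_changed_explanatory_message : Prop := Dom_explanatory_message (pvDiffWitness_explanatory_message) ∧ D_explanatory_message (pvDiffWitness_explanatory_message) ∧ explanatory_message (pvDiffWitness_explanatory_message) = pvDiffWitnessOut_explanatory_message.1 ∧ explanatory_message_alt (pvDiffWitness_explanatory_message) = pvDiffWitnessOut_explanatory_message.2 ∧ pvDiffWitnessOut_explanatory_message.1 ≠ pvDiffWitnessOut_explanatory_message.2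

def Claim_exact_explanatory_message : Prop := ∀ (message : String), Dom_explanatory_message message → D_explanatory_message message → explanatory_message message ≠ explanatory_message_alt message

-- ===== LEMMAS AND PROOFS =====

-- ---- proof-side names for A's loop body and for the cut-fold that characterises it ----

def aStep : String → String → String := fun msg marker =>
  if PySem.Str.isIn marker (PySem.Str.lower msg) then
    PySem.Str.strip (((PySem.Str.split? (PySem.Str.lower msg) marker).getD []).headD "")
  else msg

/-- A in cut-index form: the running cut accepts a marker's first occurrence iff it fits
    entirely before the current cut -/
def bStep (low : String) : Option Int → String → Option Int := fun cut marker =>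
  let i := PySem.Str.find low marker
  if i != -1 && (match cut with | none => true | some c => decide (i + PySem.Str.len marker ≤ c)) then
    some i
  else cut

lemma a_unfold (message : String) :
    explanatory_message message = List.foldl aStep message pvMarkers := rfl

/-- invariant: A's current message is the current cut applied to the lowered original -/
def invState (message : String) (c : Option Int) : String :=
  match c with
  | none => message
  | some p => String.ofList (PySem.Chars.strip ((PySem.Chars.lower message.toList).take p.toNat))

def OKc (c : Option Int) : Prop :=
  match c with
  | none => True
  | some p => 0 ≤ p

/-- markers are nonempty, already lowercase, and start/end with a non-space character -/
def GoodM (m : String) : Prop :=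
  m.toList ≠ [] ∧ PySem.Chars.lower m.toList = m.toList ∧
    PySem.Chars.isspace (m.toList.headD 'x') = false ∧
    PySem.Chars.isspace (m.toList.getLastD 'x') = false

-- ---- characters ----

lemma lowerChar_idem (c : Char) :
    PySem.Chars.lowerChar (PySem.Chars.lowerChar c) = PySem.Chars.lowerChar c := by
  by_cases h : PySem.Chars.isupper c = true
  · have hrange : 65 ≤ c.toNat ∧ c.toNat ≤ 90 := by
      simp only [PySem.Chars.isupper, Bool.and_eq_true, decide_eq_true_eq] at h
      obtain ⟨h1, h2⟩ := h
      rw [Char.le_def, UInt32.le_iff_toNat_le] at h1 h2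
      exact ⟨h1, h2⟩
    have hval : (Char.ofNat (c.toNat + 32)).toNat = c.toNat + 32 := by
      rw [Char.toNat_ofNat]
      have : (c.toNat + 32).isValidChar := by
        constructor
        omega
      simp [this]
    have hlc : PySem.Chars.lowerChar c = Char.ofNat (c.toNat + 32) := by
      simp [PySem.Chars.lowerChar, h]
    rw [hlc]
    have hnu : PySem.Chars.isupper (Char.ofNat (c.toNat + 32)) = false := by
      simp only [PySem.Chars.isupper, Bool.and_eq_false_iff]
      right
      simp only [decide_eq_false_iff_not]
      intro hle
      rw [Char.le_def, UInt32.le_iff_toNat_le] at hle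
      have : (Char.ofNat (c.toNat + 32)).toNat ≤ 90 := hle
      omega
    simp [PySem.Chars.lowerChar, hnu]
  · simp only [Bool.not_eq_true] at h
    simp [PySem.Chars.lowerChar, h]

lemma lower_fix_of_mem {c : Char} {l : List Char} (h : c ∈ PySem.Chars.lower l) :
    PySem.Chars.lowerChar c = c := by
  simp only [PySem.Chars.lower, List.mem_map] at h
  obtain ⟨d, _, rfl⟩ := h
  exact lowerChar_idem d

lemma lower_eq_self {s l : List Char} (hs : ∀ c ∈ s, c ∈ PySem.Chars.lower l) :
    PySem.Chars.lower s = s := by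
  unfold PySem.Chars.lower
  conv_rhs => rw [← List.map_id s]
  exact List.map_congr_left (fun c hc => lower_fix_of_mem (hs c hc))

-- ---- sublists ----

lemma rstrip_sublist (l : List Char) : (PySem.Chars.rstrip l).Sublist l := by
  unfold PySem.Chars.rstrip
  have := (List.dropWhile_sublist (l := l.reverse) PySem.Chars.isspace).reverse
  simpa using this

lemma strip_sublist (l : List Char) : (PySem.Chars.strip l).Sublist l := by
  unfold PySem.Chars.strip PySem.Chars.lstrip
  exact (rstrip_sublist _).trans (List.dropWhile_sublist _)

-- ---- occurrences ----

/-- `m` occurs first in `s` at position `i` -/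
def FirstOcc (s m : List Char) (i : Nat) : Prop :=
  m <+: s.drop i ∧ ∀ j < i, ¬ m <+: s.drop j

def NoOcc (s m : List Char) : Prop := ∀ j, ¬ m <+: s.drop j

lemma find_eq_of_firstOcc {s m : List Char} {i : Nat} (h : FirstOcc s m i) :
    PySem.Chars.find s m = i := by
  have hIn : PySem.Chars.isIn m s = true :=
    (PySem.Chars.exists_prefix_drop_iff_isIn m s).1 ⟨i, h.1⟩
  have hne : PySem.Chars.find s m ≠ -1 := by
    simpa [PySem.Chars.isIn, bne_iff_ne] using hIn
  have hge : -1 ≤ PySem.Chars.find s m := PySem.Chars.neg_one_le_find s m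
  have hnn : 0 ≤ PySem.Chars.find s m := by omega
  obtain ⟨hocc, hmin⟩ := PySem.Chars.find_spec hnn
  rcases Nat.lt_trichotomy (PySem.Chars.find s m).toNat i with hlt | heq | hgt
  · exact absurd hocc (h.2 _ hlt)
  · omega
  · exact absurd h.1 (hmin i hgt)

lemma find_eq_neg_one_of_noOcc {s m : List Char} (h : NoOcc s m) :
    PySem.Chars.find s m = -1 := by
  by_contra hne
  have hge : -1 ≤ PySem.Chars.find s m := PySem.Chars.neg_one_le_find s m
  have hnn : 0 ≤ PySem.Chars.find s m := by omega
  exact h _ (PySem.Chars.find_spec hnn).1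

lemma firstOcc_of_find {s m : List Char} (h : 0 ≤ PySem.Chars.find s m) :
    FirstOcc s m (PySem.Chars.find s m).toNat :=
  PySem.Chars.find_spec h

lemma noOcc_of_find {s m : List Char} (h : PySem.Chars.find s m = -1) : NoOcc s m := by
  intro j hj
  have hIn : PySem.Chars.isIn m s = true :=
    (PySem.Chars.exists_prefix_drop_iff_isIn m s).1 ⟨j, hj⟩
  simp [PySem.Chars.isIn, h] at hIn

-- ---- occurrences in a take-prefix ----

lemma occ_take_iff {s m : List Char} (hm : m ≠ []) {P j : Nat} :
    m <+: (s.take P).drop j ↔ m <+: s.drop j ∧ j + m.length ≤ P := by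
  rw [List.drop_take, List.prefix_take_iff]
  constructor
  · rintro ⟨h1, h2⟩
    refine ⟨h1, ?_⟩
    have hlen : 0 < m.length := List.length_pos_of_ne_nil hm
    omega
  · rintro ⟨h1, h2⟩
    exact ⟨h1, by omega⟩

lemma firstOcc_take {s m : List Char} (hm : m ≠ []) {i P : Nat}
    (h : FirstOcc s m i) (hP : i + m.length ≤ P) : FirstOcc (s.take P) m i := by
  refine ⟨(occ_take_iff hm).2 ⟨h.1, hP⟩, ?_⟩
  intro j hj hocc
  exact h.2 j hj ((occ_take_iff hm).1 hocc).1

lemma noOcc_take_of_firstOcc {s m : List Char} (hm : m ≠ []) {i P : Nat}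
    (h : FirstOcc s m i) (hP : P < i + m.length) : NoOcc (s.take P) m := by
  intro j hocc
  obtain ⟨h1, h2⟩ := (occ_take_iff hm).1 hocc
  rcases Nat.lt_or_ge j i with hj | hj
  · exact h.2 j hj h1
  · omega

lemma noOcc_take {s m : List Char} {P : Nat} (h : NoOcc s m) : NoOcc (s.take P) m := by
  intro j hocc
  rw [List.drop_take] at hocc
  exact h j (List.prefix_take_iff.1 hocc).1

-- ---- occurrences and lstrip ----

lemma no_occ_ws_prefix {t m : List Char} (hm : m ≠ [])
    (hh : PySem.Chars.isspace (m.headD 'x') = false) {j : Nat}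
    (hj : j < (t.takeWhile PySem.Chars.isspace).length) : ¬ m <+: t.drop j := by
  intro hocc
  obtain ⟨hd, tl, rfl⟩ : ∃ hd tl, m = hd :: tl := by
    cases m with
    | nil => exact absurd rfl hm
    | cons a b => exact ⟨a, b, rfl⟩
  obtain ⟨u, hu⟩ := hocc
  have hget : t[j]? = some hd := by
    have h1 : (t.drop j)[0]? = some hd := by rw [← hu]; rfl
    rwa [List.getElem?_drop, Nat.add_zero] at h1
  have hws : PySem.Chars.isspace hd = true := by
    obtain ⟨s, hs⟩ := List.takeWhile_prefix (l := t) PySem.Chars.isspace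
    have h3 : t[j]? = (t.takeWhile PySem.Chars.isspace)[j]? := by
      conv_lhs => rw [← hs]
      rw [List.getElem?_append_left hj]
    rw [hget, List.getElem?_eq_getElem hj] at h3
    have h4 : (t.takeWhile PySem.Chars.isspace)[j]'hj ∈ t.takeWhile PySem.Chars.isspace :=
      List.getElem_mem hj
    have h5 := List.mem_takeWhile_imp h4
    rw [← Option.some_inj.1 h3] at h5
    exact h5
  simp only [List.headD_cons] at hh
  rw [hws] at hh
  exact Bool.noConfusion hh

lemma dropWhile_eq_drop (p : Char → Bool) (l : List Char) :
    l.dropWhile p = l.drop (l.takeWhile p).length := by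
  have h := List.drop_left' (l₁ := l.takeWhile p) (l₂ := l.dropWhile p) rfl
  rw [List.takeWhile_append_dropWhile] at h
  exact h.symm

lemma firstOcc_lstrip {t m : List Char} (hm : m ≠ [])
    (hh : PySem.Chars.isspace (m.headD 'x') = false) {i : Nat} (h : FirstOcc t m i) :
    (t.takeWhile PySem.Chars.isspace).length ≤ i ∧
      FirstOcc (t.dropWhile PySem.Chars.isspace) m (i - (t.takeWhile PySem.Chars.isspace).length) := by
  have hki : (t.takeWhile PySem.Chars.isspace).length ≤ i := by
    by_contra hlt
    exact no_occ_ws_prefix hm hh (by omega) h.1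
  refine ⟨hki, ?_, ?_⟩
  · rw [dropWhile_eq_drop, List.drop_drop]
    have heq : (t.takeWhile PySem.Chars.isspace).length +
        (i - (t.takeWhile PySem.Chars.isspace).length) = i := by omega
    rw [heq]
    exact h.1
  · intro j hj hocc
    rw [dropWhile_eq_drop, List.drop_drop] at hocc
    exact h.2 ((t.takeWhile PySem.Chars.isspace).length + j) (by omega) hocc

lemma noOcc_lstrip {t m : List Char} (h : NoOcc t m) :
    NoOcc (t.dropWhile PySem.Chars.isspace) m := by
  intro j hocc
  rw [dropWhile_eq_drop, List.drop_drop] at hocc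
  exact h _ hocc

-- ---- occurrences and rstrip ----

lemma rstrip_decomp (u : List Char) :
    PySem.Chars.rstrip u ++ (u.reverse.takeWhile PySem.Chars.isspace).reverse = u := by
  unfold PySem.Chars.rstrip
  rw [← List.reverse_append, List.takeWhile_append_dropWhile, List.reverse_reverse]

lemma mem_rstrip_tail_ws {u : List Char} {c : Char}
    (h : c ∈ (u.reverse.takeWhile PySem.Chars.isspace).reverse) :
    PySem.Chars.isspace c = true :=
  List.mem_takeWhile_imp (List.mem_reverse.1 h)

lemma rstrip_append_ws {x w : List Char} (hw : ∀ c ∈ w, PySem.Chars.isspace c = true) :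
    PySem.Chars.rstrip (x ++ w) = PySem.Chars.rstrip x := by
  unfold PySem.Chars.rstrip
  rw [List.reverse_append, List.dropWhile_append]
  have h0 : w.reverse.dropWhile PySem.Chars.isspace = [] := by
    rw [List.dropWhile_eq_nil_iff]
    intro c hc
    exact hw c (List.mem_reverse.1 hc)
  simp [h0]

lemma rstrip_prefix (u : List Char) : PySem.Chars.rstrip u <+: u :=
  ⟨(u.reverse.takeWhile PySem.Chars.isspace).reverse, rstrip_decomp u⟩

lemma rstrip_last_not_ws {u : List Char} (h : PySem.Chars.rstrip u ≠ []) :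
    PySem.Chars.isspace ((PySem.Chars.rstrip u).getLast h) = false := by
  unfold PySem.Chars.rstrip at h ⊢
  rw [List.getLast_reverse]
  exact List.head_dropWhile_not _ _

lemma rstrip_eq_self {x : List Char}
    (h : ∀ hx : x ≠ [], PySem.Chars.isspace (x.getLast hx) = false) :
    PySem.Chars.rstrip x = x := by
  unfold PySem.Chars.rstrip
  cases hr : x.reverse with
  | nil =>
    have hx : x = [] := by simpa using congrArg List.reverse hr
    simp [hx]
  | cons c r =>
    have hxne : x ≠ [] := by
      intro h0
      rw [h0] at hr
      simp at hr
    have hc : c = x.getLast hxne := by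
      have h1 : x.getLast? = some c := by
        rw [← List.head?_reverse, hr]
        rfl
      rw [List.getLast?_eq_some_getLast hxne] at h1
      exact (Option.some_inj.1 h1).symm
    have hcw : PySem.Chars.isspace c = false := by
      rw [hc]
      exact h hxne
    rw [List.dropWhile_cons, hcw]
    simp only [Bool.false_eq_true, if_false]
    rw [← hr, List.reverse_reverse]

lemma rstrip_idem (u : List Char) :
    PySem.Chars.rstrip (PySem.Chars.rstrip u) = PySem.Chars.rstrip u :=
  rstrip_eq_self (fun hx => rstrip_last_not_ws hx)

lemma rstrip_ne_nil_of_head {v : List Char} (hv : v ≠ [])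
    (hhead : PySem.Chars.isspace (v.headD 'x') = false) : PySem.Chars.rstrip v ≠ [] := by
  intro hnil
  have hdec := rstrip_decomp v
  rw [hnil, List.nil_append] at hdec
  have hmem : v.headD 'x' ∈ (v.reverse.takeWhile PySem.Chars.isspace).reverse := by
    rw [hdec]
    cases v with
    | nil => exact absurd rfl hv
    | cons a b => simp
  have hws := mem_rstrip_tail_ws hmem
  rw [hws] at hhead
  exact Bool.noConfusion hhead

lemma occ_rstrip_iff {u m : List Char} (hm : m ≠ [])
    (hl : PySem.Chars.isspace (m.getLastD 'x') = false) {j : Nat} :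
    m <+: (PySem.Chars.rstrip u).drop j ↔ m <+: u.drop j := by
  have hpre : PySem.Chars.rstrip u = u.take (PySem.Chars.rstrip u).length :=
    List.prefix_iff_eq_take.1 (rstrip_prefix u)
  constructor
  · intro h
    rw [hpre] at h
    exact ((occ_take_iff hm).1 h).1
  · intro h
    rw [hpre]
    refine (occ_take_iff hm).2 ⟨h, ?_⟩
    rcases Nat.lt_or_ge (PySem.Chars.rstrip u).length (j + m.length) with hgt | hle
    · exfalso
      obtain ⟨w, hw⟩ := h
      have hlenm : 0 < m.length := List.length_pos_of_ne_nil hm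
      have hlen : (u.drop j).length = m.length + w.length := by
        rw [← hw]
        simp
      have hdlen : (u.drop j).length = u.length - j := List.length_drop
      have hjlen : j + m.length ≤ u.length := by omega
      have hidx : j + m.length - 1 < u.length := by omega
      have hgetm : u[j + m.length - 1]? = some (m.getLast hm) := by
        have h1 : (u.drop j)[m.length - 1]? = some (m.getLast hm) := by
          rw [← hw, List.getElem?_append_left (by omega),
            List.getElem?_eq_getElem (by omega : m.length - 1 < m.length)]
          rw [List.getLast_eq_getElem]
        rw [List.getElem?_drop] at h1
        have heq : j + (m.length - 1) = j + m.length - 1 := by omega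
        rwa [heq] at h1
      have hdec := rstrip_decomp u
      have htlen : (PySem.Chars.rstrip u).length +
          ((u.reverse.takeWhile PySem.Chars.isspace).reverse).length = u.length := by
        have := congrArg List.length hdec
        simpa using this
      have hws : PySem.Chars.isspace (m.getLast hm) = true := by
        have h2 : u[j + m.length - 1]? =
            ((u.reverse.takeWhile PySem.Chars.isspace).reverse)[j + m.length - 1 -
              (PySem.Chars.rstrip u).length]? := by
          conv_lhs => rw [← hdec]
          rw [List.getElem?_append_right (by omega)]
        rw [hgetm] at h2
        have hlt : j + m.length - 1 - (PySem.Chars.rstrip u).length <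
            ((u.reverse.takeWhile PySem.Chars.isspace).reverse).length := by omega
        rw [List.getElem?_eq_getElem hlt] at h2
        have h3 := List.getElem_mem (l := (u.reverse.takeWhile PySem.Chars.isspace).reverse) hlt
        have h4 := mem_rstrip_tail_ws h3
        rw [Option.some_inj.1 h2]
        exact h4
      have h6 : m.getLastD 'x' = m.getLast hm := by
        rw [List.getLastD_eq_getLast?, List.getLast?_eq_some_getLast hm]
        rfl
      rw [h6, hws] at hl
      exact Bool.noConfusion hl
    · exact hle

lemma firstOcc_rstrip {u m : List Char} (hm : m ≠ [])
    (hl : PySem.Chars.isspace (m.getLastD 'x') = false) {i : Nat} (h : FirstOcc u m i) :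
    FirstOcc (PySem.Chars.rstrip u) m i :=
  ⟨(occ_rstrip_iff hm hl).2 h.1, fun j hj hocc => h.2 j hj ((occ_rstrip_iff hm hl).1 hocc)⟩

lemma noOcc_rstrip {u m : List Char} (hm : m ≠ [])
    (hl : PySem.Chars.isspace (m.getLastD 'x') = false) (h : NoOcc u m) :
    NoOcc (PySem.Chars.rstrip u) m :=
  fun j hocc => h j ((occ_rstrip_iff hm hl).1 hocc)

-- ---- occurrences and strip ----

lemma strip_eq (t : List Char) :
    PySem.Chars.strip t = PySem.Chars.rstrip (t.dropWhile PySem.Chars.isspace) := rfl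

lemma firstOcc_strip {t m : List Char} (hm : m ≠ [])
    (hh : PySem.Chars.isspace (m.headD 'x') = false)
    (hl : PySem.Chars.isspace (m.getLastD 'x') = false) {i : Nat} (h : FirstOcc t m i) :
    (t.takeWhile PySem.Chars.isspace).length ≤ i ∧
      FirstOcc (PySem.Chars.strip t) m (i - (t.takeWhile PySem.Chars.isspace).length) := by
  obtain ⟨hki, h2⟩ := firstOcc_lstrip hm hh h
  exact ⟨hki, by rw [strip_eq]; exact firstOcc_rstrip hm hl h2⟩

lemma noOcc_strip {t m : List Char} (hm : m ≠ [])
    (hl : PySem.Chars.isspace (m.getLastD 'x') = false) (h : NoOcc t m) :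
    NoOcc (PySem.Chars.strip t) m := by
  rw [strip_eq]
  exact noOcc_rstrip hm hl (noOcc_lstrip h)

-- ---- the strip/take/strip identity ----

lemma strip_ws_append {w x : List Char} (hw : ∀ c ∈ w, PySem.Chars.isspace c = true) :
    PySem.Chars.strip (w ++ x) = PySem.Chars.strip x := by
  unfold PySem.Chars.strip PySem.Chars.lstrip
  rw [List.dropWhile_append]
  have h0 : w.dropWhile PySem.Chars.isspace = [] := List.dropWhile_eq_nil_iff.2 hw
  simp [h0]

lemma strip_eq_rstrip_of_head {v : List Char}
    (hv : ∀ _ : v ≠ [], PySem.Chars.isspace (v.headD 'x') = false) :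
    PySem.Chars.strip v = PySem.Chars.rstrip v := by
  unfold PySem.Chars.strip PySem.Chars.lstrip
  cases hc : v with
  | nil => rfl
  | cons a b =>
    have ha : PySem.Chars.isspace a = false := by
      have := hv (by rw [hc]; simp)
      rw [hc] at this
      simpa using this
    rw [List.dropWhile_cons, ha]
    simp

lemma head_not_ws_of_dropWhile {t : List Char} (h : t.dropWhile PySem.Chars.isspace ≠ []) :
    PySem.Chars.isspace ((t.dropWhile PySem.Chars.isspace).headD 'x') = false := by
  have h1 := List.head_dropWhile_not (l := t) PySem.Chars.isspace h
  rw [List.headD_eq_head?, List.head?_eq_some_head h]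
  simpa using h1

lemma headD_append_left {l r : List Char} (h : l ≠ []) (d : Char) :
    (l ++ r).headD d = l.headD d := by
  cases l with
  | nil => exact absurd rfl h
  | cons a b => rfl

lemma headD_rstrip {v : List Char} (h : PySem.Chars.rstrip v ≠ []) (d : Char) :
    (PySem.Chars.rstrip v).headD d = v.headD d := by
  obtain ⟨w, hw⟩ := rstrip_prefix v
  conv_rhs => rw [← hw]
  rw [headD_append_left h]

lemma strip_take_strip (t : List Char) (i : Nat)
    (hik : (t.takeWhile PySem.Chars.isspace).length ≤ i) :
    PySem.Chars.strip ((PySem.Chars.strip t).take (i - (t.takeWhile PySem.Chars.isspace).length)) =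
      PySem.Chars.strip (t.take i) := by
  have htw : ∀ c ∈ t.takeWhile PySem.Chars.isspace, PySem.Chars.isspace c = true :=
    fun c hc => List.mem_takeWhile_imp hc
  have h0 : t.take i = (t.takeWhile PySem.Chars.isspace).take i ++
      (t.dropWhile PySem.Chars.isspace).take (i - (t.takeWhile PySem.Chars.isspace).length) := by
    conv_lhs => rw [← List.takeWhile_append_dropWhile (p := PySem.Chars.isspace) (l := t)]
    rw [List.take_append]
  have htake : t.take i = t.takeWhile PySem.Chars.isspace ++
      (t.dropWhile PySem.Chars.isspace).take (i - (t.takeWhile PySem.Chars.isspace).length) := by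
    rw [h0, List.take_of_length_le hik]
  have hRHS : PySem.Chars.strip (t.take i) =
      PySem.Chars.strip ((t.dropWhile PySem.Chars.isspace).take
        (i - (t.takeWhile PySem.Chars.isspace).length)) := by
    rw [htake]
    exact strip_ws_append htw
  have hst : PySem.Chars.strip t = PySem.Chars.rstrip (t.dropWhile PySem.Chars.isspace) := by
    conv_lhs => rw [← List.takeWhile_append_dropWhile (p := PySem.Chars.isspace) (l := t)]
    rw [strip_ws_append htw,
      strip_eq_rstrip_of_head (v := t.dropWhile PySem.Chars.isspace)
        (fun hne => head_not_ws_of_dropWhile hne)]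
  rw [hRHS, hst]
  set q := i - (t.takeWhile PySem.Chars.isspace).length with hqdef
  set v := t.dropWhile PySem.Chars.isspace with hvdef
  by_cases hvne : v = []
  · rw [hvne]
    simp [PySem.Chars.rstrip]
  · have hhead : PySem.Chars.isspace (v.headD 'x') = false := head_not_ws_of_dropWhile hvne
    rcases Nat.eq_zero_or_pos q with hq0 | hqpos
    · rw [hq0]
      simp
    · have hrne : PySem.Chars.rstrip v ≠ [] := rstrip_ne_nil_of_head hvne hhead
      have hrpre : PySem.Chars.rstrip v = v.take (PySem.Chars.rstrip v).length :=
        List.prefix_iff_eq_take.1 (rstrip_prefix v)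
      rcases Nat.lt_or_ge (PySem.Chars.rstrip v).length q with hrq | hqr
      · have h1 : (PySem.Chars.rstrip v).take q = PySem.Chars.rstrip v :=
          List.take_of_length_le (by omega)
        have hdec := rstrip_decomp v
        have h2 : v.take q = PySem.Chars.rstrip v ++
            ((v.reverse.takeWhile PySem.Chars.isspace).reverse).take
              (q - (PySem.Chars.rstrip v).length) := by
          conv_lhs => rw [← hdec]
          rw [List.take_append, List.take_of_length_le (by omega : (PySem.Chars.rstrip v).length ≤ q)]
        rw [h1, h2]
        have hwws : ∀ c ∈ ((v.reverse.takeWhile PySem.Chars.isspace).reverse).take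
            (q - (PySem.Chars.rstrip v).length), PySem.Chars.isspace c = true :=
          fun c hc => mem_rstrip_tail_ws (List.Sublist.mem hc (List.take_sublist _ _))
        have hhr : ∀ _ : PySem.Chars.rstrip v ++
              ((v.reverse.takeWhile PySem.Chars.isspace).reverse).take
                (q - (PySem.Chars.rstrip v).length) ≠ [],
            PySem.Chars.isspace ((PySem.Chars.rstrip v ++
              ((v.reverse.takeWhile PySem.Chars.isspace).reverse).take
                (q - (PySem.Chars.rstrip v).length)).headD 'x') = false := by
          intro _
          rw [headD_append_left hrne, headD_rstrip hrne]
          exact hhead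
        have hsv : ∀ _ : PySem.Chars.rstrip v ≠ [],
            PySem.Chars.isspace ((PySem.Chars.rstrip v).headD 'x') = false := by
          intro _
          rw [headD_rstrip hrne]
          exact hhead
        rw [strip_eq_rstrip_of_head hhr, strip_eq_rstrip_of_head hsv,
          rstrip_append_ws hwws, rstrip_idem]
      · have heq2 : (PySem.Chars.rstrip v).take q = v.take q := by
          conv_lhs => rw [hrpre]
          rw [List.take_take, Nat.min_eq_left hqr]
        rw [heq2]

-- ---- find.go and splitOn ----

lemma findGo_eq {m : List Char} (hm : m ≠ []) : ∀ (l : List Char) (k : Nat),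
    PySem.Chars.find.go m l k =
      (if 0 ≤ PySem.Chars.find l m then PySem.Chars.find l m + k else -1) := by
  intro l
  induction l with
  | nil =>
    intro k
    have hempty : m.isEmpty = false := by
      cases m with
      | nil => exact absurd rfl hm
      | cons a b => rfl
    simp [PySem.Chars.find, PySem.Chars.find.go, hempty]
  | cons c rest ih =>
    intro k
    by_cases hpre : m.isPrefixOf (c :: rest) = true
    · simp [PySem.Chars.find, PySem.Chars.find.go, hpre]
    · have hpre' : m.isPrefixOf (c :: rest) = false := by
        simp only [Bool.not_eq_true] at hpre
        exact hpre
      rw [show PySem.Chars.find.go m (c :: rest) k = PySem.Chars.find.go m rest (k + 1) by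
        simp [PySem.Chars.find.go, hpre']]
      rw [show PySem.Chars.find (c :: rest) m = PySem.Chars.find.go m rest 1 by
        simp [PySem.Chars.find, PySem.Chars.find.go, hpre']]
      rw [ih (k + 1), ih 1]
      split_ifs <;> omega

lemma gacc (m : List Char) : ∀ (fuel : Nat) (l cur : List Char) (acc : List (List Char)),
    PySem.Chars.splitOn.go m fuel l cur acc =
      acc.reverse ++ PySem.Chars.splitOn.go m fuel l cur [] := by
  intro fuel
  induction fuel with
  | zero =>
    intro l cur acc
    simp [PySem.Chars.splitOn.go]
  | succ n ih =>
    intro l cur acc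
    cases l with
    | nil => simp [PySem.Chars.splitOn.go]
    | cons c rest =>
      by_cases hpre : m.isPrefixOf (c :: rest) = true
      · rw [show PySem.Chars.splitOn.go m (n + 1) (c :: rest) cur acc =
            PySem.Chars.splitOn.go m n ((c :: rest).drop m.length) [] (cur.reverse :: acc) by
          simp [PySem.Chars.splitOn.go, hpre]]
        rw [show PySem.Chars.splitOn.go m (n + 1) (c :: rest) cur [] =
            PySem.Chars.splitOn.go m n ((c :: rest).drop m.length) [] [cur.reverse] by
          simp [PySem.Chars.splitOn.go, hpre]]
        rw [ih _ _ (cur.reverse :: acc), ih _ _ [cur.reverse]]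
        simp
      · have hpre' : m.isPrefixOf (c :: rest) = false := by
          simp only [Bool.not_eq_true] at hpre
          exact hpre
        rw [show PySem.Chars.splitOn.go m (n + 1) (c :: rest) cur acc =
            PySem.Chars.splitOn.go m n rest (c :: cur) acc by
          simp [PySem.Chars.splitOn.go, hpre']]
        rw [show PySem.Chars.splitOn.go m (n + 1) (c :: rest) cur [] =
            PySem.Chars.splitOn.go m n rest (c :: cur) [] by
          simp [PySem.Chars.splitOn.go, hpre']]
        exact ih _ _ acc

lemma go_head {m : List Char} (hm : m ≠ []) : ∀ (fuel : Nat) (l cur : List Char),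
    l.length < fuel →
    (PySem.Chars.splitOn.go m fuel l cur []).headD [] =
      cur.reverse ++ l.take (if 0 ≤ PySem.Chars.find l m then (PySem.Chars.find l m).toNat else l.length) := by
  intro fuel
  induction fuel with
  | zero =>
    intro l cur h
    omega
  | succ n ih =>
    intro l cur hlen
    cases l with
    | nil =>
      simp [PySem.Chars.splitOn.go]
    | cons c rest =>
      by_cases hpre : m.isPrefixOf (c :: rest) = true
      · have hfind : PySem.Chars.find (c :: rest) m = 0 := by
          simp [PySem.Chars.find, PySem.Chars.find.go, hpre]
        rw [show PySem.Chars.splitOn.go m (n + 1) (c :: rest) cur [] =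
            PySem.Chars.splitOn.go m n ((c :: rest).drop m.length) [] [cur.reverse] by
          simp [PySem.Chars.splitOn.go, hpre]]
        rw [gacc]
        simp [hfind]
      · have hpre' : m.isPrefixOf (c :: rest) = false := by
          simp only [Bool.not_eq_true] at hpre
          exact hpre
        have hfind : PySem.Chars.find (c :: rest) m =
            (if 0 ≤ PySem.Chars.find rest m then PySem.Chars.find rest m + 1 else -1) := by
          rw [show PySem.Chars.find (c :: rest) m = PySem.Chars.find.go m rest 1 by
            simp [PySem.Chars.find, PySem.Chars.find.go, hpre']]
          exact findGo_eq hm rest 1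
        rw [show PySem.Chars.splitOn.go m (n + 1) (c :: rest) cur [] =
            PySem.Chars.splitOn.go m n rest (c :: cur) [] by
          simp [PySem.Chars.splitOn.go, hpre']]
        rw [ih rest (c :: cur) (by simpa using hlen)]
        by_cases hf : 0 ≤ PySem.Chars.find rest m
        · have h1 : (0 : Int) ≤ PySem.Chars.find rest m + 1 := by omega
          rw [hfind]
          simp only [hf, h1, if_true]
          have htn : (PySem.Chars.find rest m + 1).toNat = (PySem.Chars.find rest m).toNat + 1 := by
            omega
          rw [htn, List.take_succ_cons]
          simp
        · have h1 : ¬ (0 : Int) ≤ -1 := by norm_num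
          rw [hfind]
          simp only [hf, h1, if_false]
          rw [show (c :: rest).length = rest.length + 1 from rfl, List.take_succ_cons,
            List.take_of_length_le (le_refl rest.length)]
          simp

lemma splitOn_headD {s m : List Char} (hm : m ≠ []) (hf : 0 ≤ PySem.Chars.find s m) :
    (PySem.Chars.splitOn s m).headD [] = s.take (PySem.Chars.find s m).toNat := by
  unfold PySem.Chars.splitOn
  rw [go_head hm (s.length + 1) s [] (by omega)]
  simp [hf]

-- ---- the A-side step, computed ----

lemma aStep_matched {msg m : String} (hm : m.toList ≠ [])
    (hfind : 0 ≤ PySem.Chars.find (PySem.Chars.lower msg.toList) m.toList) :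
    aStep msg m = String.ofList (PySem.Chars.strip
      ((PySem.Chars.lower msg.toList).take
        (PySem.Chars.find (PySem.Chars.lower msg.toList) m.toList).toNat)) := by
  have htl : (PySem.Str.lower msg).toList = PySem.Chars.lower msg.toList :=
    PySem.Str.toList_lower msg
  have hIn : PySem.Str.isIn m (PySem.Str.lower msg) = true := by
    rw [PySem.Str.isIn_eq, htl]
    unfold PySem.Chars.isIn
    simp only [bne_iff_ne, ne_eq]
    omega
  have hempty : m.toList.isEmpty = false := by
    cases hc : m.toList with
    | nil => exact absurd hc hm
    | cons a b => rfl
  simp only [aStep]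
  rw [if_pos hIn]
  have hsplit : PySem.Str.split? (PySem.Str.lower msg) m =
      some ((PySem.Chars.splitOn (PySem.Chars.lower msg.toList) m.toList).map String.ofList) := by
    unfold PySem.Str.split? PySem.Chars.split?
    rw [htl, hempty]
    simp
  rw [hsplit]
  simp only [Option.getD_some]
  have hhead : ((PySem.Chars.splitOn (PySem.Chars.lower msg.toList) m.toList).map String.ofList).headD "" =
      String.ofList ((PySem.Chars.splitOn (PySem.Chars.lower msg.toList) m.toList).headD []) := by
    cases PySem.Chars.splitOn (PySem.Chars.lower msg.toList) m.toList with
    | nil => rfl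
    | cons a b => rfl
  rw [hhead, splitOn_headD hm hfind]
  unfold PySem.Str.strip
  rw [String.toList_ofList]

lemma aStep_unmatched {msg m : String}
    (hfind : PySem.Chars.find (PySem.Chars.lower msg.toList) m.toList = -1) :
    aStep msg m = msg := by
  have hIn2 : PySem.Chars.isIn m.toList (PySem.Chars.lower msg.toList) = false := by
    unfold PySem.Chars.isIn
    simp [hfind]
  simp [aStep, hIn2]

-- ---- the lowered state is already lowercase ----

lemma lower_invState {message : String} {p : Int} :
    PySem.Chars.lower (invState message (some p)).toList =
      PySem.Chars.strip ((PySem.Chars.lower message.toList).take p.toNat) := by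
  simp only [invState]
  rw [String.toList_ofList]
  apply lower_eq_self
  intro c hc
  exact List.Sublist.mem hc ((strip_sublist _).trans (List.take_sublist _ _))

-- ---- the single-step simulation: A's step is the fit-fold step ----

lemma step_main (message m : String) (hm : GoodM m) (c : Option Int) (hc : OKc c) :
    aStep (invState message c) m = invState message (bStep (PySem.Str.lower message) c m) ∧
      OKc (bStep (PySem.Str.lower message) c m) := by
  obtain ⟨hne, _, hh, hl⟩ := hm
  have hfind_b : PySem.Str.find (PySem.Str.lower message) m =
      PySem.Chars.find (PySem.Chars.lower message.toList) m.toList := by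
    rw [PySem.Str.find_eq, PySem.Str.toList_lower]
  have hlen_b : PySem.Str.len m = (m.toList.length : Int) := rfl
  have hgem := PySem.Chars.neg_one_le_find (PySem.Chars.lower message.toList) m.toList
  have hlenm := List.length_pos_of_ne_nil hne
  cases c with
  | none =>
    have hinv : invState message none = message := rfl
    by_cases h0 : PySem.Chars.find (PySem.Chars.lower message.toList) m.toList = -1
    · have hb : bStep (PySem.Str.lower message) none m = none := by
        simp only [bStep]
        rw [hfind_b, h0]
        simp
      rw [hb, hinv]
      exact ⟨aStep_unmatched h0, trivial⟩
    · have hnn : 0 ≤ PySem.Chars.find (PySem.Chars.lower message.toList) m.toList := by omega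
      have hb : bStep (PySem.Str.lower message) none m =
          some (PySem.Chars.find (PySem.Chars.lower message.toList) m.toList) := by
        simp only [bStep]
        rw [hfind_b]
        have hbne : (PySem.Chars.find (PySem.Chars.lower message.toList) m.toList != -1) = true := by
          simpa using h0
        simp [hbne]
      rw [hb, hinv]
      refine ⟨?_, hnn⟩
      rw [aStep_matched hne hnn]
      rfl
  | some p =>
    have hp : 0 ≤ p := hc
    by_cases h0 : 0 ≤ PySem.Chars.find (PySem.Chars.lower message.toList) m.toList
    · have hfo := firstOcc_of_find h0
      by_cases hfit : (PySem.Chars.find (PySem.Chars.lower message.toList) m.toList).toNat +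
          m.toList.length ≤ p.toNat
      · obtain ⟨hki, hfo_s⟩ := firstOcc_strip hne hh hl (firstOcc_take hne hfo hfit)
        have hfs : PySem.Chars.find
            (PySem.Chars.strip ((PySem.Chars.lower message.toList).take p.toNat)) m.toList =
            ((((PySem.Chars.find (PySem.Chars.lower message.toList) m.toList).toNat -
              (((PySem.Chars.lower message.toList).take p.toNat).takeWhile
                PySem.Chars.isspace).length) : Nat) : Int) :=
          find_eq_of_firstOcc hfo_s
        have hb : bStep (PySem.Str.lower message) (some p) m =
            some (PySem.Chars.find (PySem.Chars.lower message.toList) m.toList) := by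
          simp only [bStep, hfind_b, hlen_b]
          have hcondb : ((PySem.Chars.find (PySem.Chars.lower message.toList) m.toList != -1) &&
              decide (PySem.Chars.find (PySem.Chars.lower message.toList) m.toList +
                (m.toList.length : Int) ≤ p)) = true := by
            rw [Bool.and_eq_true, bne_iff_ne, decide_eq_true_eq]
            exact ⟨by omega, by omega⟩
          rw [if_pos hcondb]
        rw [hb]
        refine ⟨?_, h0⟩
        rw [aStep_matched hne (by rw [lower_invState, hfs]; exact Int.natCast_nonneg _)]
        rw [lower_invState, hfs, Int.toNat_natCast]
        simp only [invState]
        congr 1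
        rw [strip_take_strip ((PySem.Chars.lower message.toList).take p.toNat)
          (PySem.Chars.find (PySem.Chars.lower message.toList) m.toList).toNat hki]
        rw [List.take_take, Nat.min_eq_left (by omega)]
      · have hno_s : NoOcc
            (PySem.Chars.strip ((PySem.Chars.lower message.toList).take p.toNat)) m.toList :=
          noOcc_strip hne hl (noOcc_take_of_firstOcc hne hfo (by omega))
        have hfs : PySem.Chars.find
            (PySem.Chars.strip ((PySem.Chars.lower message.toList).take p.toNat)) m.toList = -1 :=
          find_eq_neg_one_of_noOcc hno_s
        have hb : bStep (PySem.Str.lower message) (some p) m = some p := by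
          simp only [bStep, hfind_b, hlen_b]
          have hcondb : ((PySem.Chars.find (PySem.Chars.lower message.toList) m.toList != -1) &&
              decide (PySem.Chars.find (PySem.Chars.lower message.toList) m.toList +
                (m.toList.length : Int) ≤ p)) = false := by
            rw [Bool.and_eq_false_iff]
            right
            rw [decide_eq_false_iff_not]
            omega
          rw [if_neg (by rw [hcondb]; exact Bool.false_ne_true)]
        rw [hb]
        have hfind' : PySem.Chars.find
            (PySem.Chars.lower (invState message (some p)).toList) m.toList = -1 := by
          rw [lower_invState]
          exact hfs
        exact ⟨aStep_unmatched hfind', hp⟩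
    · have hneg : PySem.Chars.find (PySem.Chars.lower message.toList) m.toList = -1 := by omega
      have hno : NoOcc (PySem.Chars.lower message.toList) m.toList := noOcc_of_find hneg
      have hfs : PySem.Chars.find
          (PySem.Chars.strip ((PySem.Chars.lower message.toList).take p.toNat)) m.toList = -1 :=
        find_eq_neg_one_of_noOcc (noOcc_strip hne hl (noOcc_take hno))
      have hb : bStep (PySem.Str.lower message) (some p) m = some p := by
        simp only [bStep]
        rw [hfind_b, hneg]
        simp
      rw [hb]
      have hfind' : PySem.Chars.find
          (PySem.Chars.lower (invState message (some p)).toList) m.toList = -1 := by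
        rw [lower_invState]
        exact hfs
      exact ⟨aStep_unmatched hfind', hp⟩

-- ---- the fold simulation: A's loop is the fit-fold ----

lemma fold_main (message : String) (ms : List String) (hms : ∀ x ∈ ms, GoodM x) :
    ∀ (c : Option Int), OKc c →
      List.foldl aStep (invState message c) ms =
        invState message (List.foldl (bStep (PySem.Str.lower message)) c ms) ∧
        OKc (List.foldl (bStep (PySem.Str.lower message)) c ms) := by
  induction ms with
  | nil =>
    intro c hc
    exact ⟨rfl, hc⟩
  | cons x xs ih =>
    intro c hc
    have hx : GoodM x := hms x (by simp)
    have hxs : ∀ y ∈ xs, GoodM y := fun y hy => hms y (by simp [hy])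
    obtain ⟨hstep, hok⟩ := step_main message x hx c hc
    rw [List.foldl_cons, List.foldl_cons, hstep]
    exact ih hxs _ hok

lemma markers_good : ∀ x ∈ pvMarkers, GoodM x := by
  intro x hx
  fin_cases hx <;> exact ⟨by decide, by decide, by decide, by decide⟩

-- ---- B side: the min-fold step and its relation to A's fit-fold ----

/-- the min-fold step B's positions/min computation amounts to -/
def minStep (low : String) : Option Int → String → Option Int := fun cut marker =>
  let i := PySem.Str.find low marker
  if i = -1 then cut else some (match cut with | none => i | some c => min c i)

/-- the running cut is a nonnegative find of some marker -/
def AccC (low : String) (c : Option Int) : Prop :=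
  match c with
  | none => True
  | some v => 0 ≤ v ∧ ∃ m' ∈ pvMarkers, PySem.Str.find low m' = v

def tS : String := "this commit message"
def fourM : List String := ["explanation:", "explanation of changes:", "note:", "notes:"]

lemma pvSplit : pvMarkers = fourM ++ tS :: ["i hope this helps", "please let me know"] := rfl

-- overlap classification: two marker occurrences can only overlap at the same position with the
-- same marker, or as "this commit message" with an "explanation…" marker 18 characters later
set_option maxRecDepth 10000 in
lemma classify_bool : (pvMarkers.all (fun m => pvMarkers.all (fun m' =>
    (List.range m.toList.length).all (fun d =>
      (!(List.isPrefixOf (m.toList.drop d) m'.toList) &&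
       !(List.isPrefixOf m'.toList (m.toList.drop d))) ||
      decide ((d = 0 ∧ m = m') ∨
        (m = "this commit message" ∧
          (m' = "explanation:" ∨ m' = "explanation of changes:") ∧ d = 18)))))) = true := by
  decide

lemma classify {m m' : String} (hm : m ∈ pvMarkers) (hm' : m' ∈ pvMarkers) {d : Nat}
    (hdm : d < m.toList.length)
    (hcompat : m.toList.drop d <+: m'.toList ∨ m'.toList <+: m.toList.drop d) :
    (d = 0 ∧ m = m') ∨
      (m = "this commit message" ∧ (m' = "explanation:" ∨ m' = "explanation of changes:") ∧ d = 18) := by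
  have hb := classify_bool
  rw [List.all_eq_true] at hb
  have hb1 := hb m hm
  rw [List.all_eq_true] at hb1
  have hb2 := hb1 m' hm'
  rw [List.all_eq_true] at hb2
  have hb3 := hb2 d (List.mem_range.2 hdm)
  rcases Bool.or_eq_true_iff.1 hb3 with h | h
  · exfalso
    rcases hcompat with hc | hc
    · have ht := List.isPrefixOf_iff_prefix.2 hc
      simp only [ht, Bool.not_true, Bool.false_and] at h
      exact Bool.noConfusion h
    · have ht := List.isPrefixOf_iff_prefix.2 hc
      simp only [ht, Bool.not_true, Bool.and_false] at h
      exact Bool.noConfusion h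
  · exact of_decide_eq_true h

lemma prefix_take_append {a b s : List Char} (d : Nat) (ha : a <+: s) (hd : d ≤ a.length)
    (hb : b <+: s.drop d) : (a.take d ++ b) <+: s := by
  obtain ⟨u, hu⟩ := hb
  obtain ⟨v, hv⟩ := ha
  have htake : s.take d = a.take d := by
    rw [← hv, List.take_append_of_le_length hd]
  refine ⟨u, ?_⟩
  calc (a.take d ++ b) ++ u = a.take d ++ (b ++ u) := by rw [List.append_assoc]
    _ = s.take d ++ s.drop d := by rw [htake, hu]
    _ = s := List.take_append_drop d s

/-- occurrence classification: overlapping occurrences of two markers -/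
lemma occCL {s : List Char} {m m' : String} (hm : m ∈ pvMarkers) (hm' : m' ∈ pvMarkers)
    {a b : Nat} (hab : a ≤ b) (hov : b < a + m.toList.length)
    (h1 : m.toList <+: s.drop a) (h2 : m'.toList <+: s.drop b) :
    (b = a ∧ m = m') ∨
      (m = "this commit message" ∧ (m' = "explanation:" ∨ m' = "explanation of changes:") ∧
        b = a + 18) := by
  set d := b - a with hd
  have hdm : d < m.toList.length := by omega
  have hdropped : m.toList.drop d <+: s.drop b := by
    obtain ⟨u, hu⟩ := h1
    have h3 : (s.drop a).drop d = m.toList.drop d ++ u := by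
      rw [← hu, List.drop_append_of_le_length (by omega)]
    rw [List.drop_drop, show a + d = b by omega] at h3
    exact ⟨u, h3.symm⟩
  have hcompat := List.prefix_or_prefix_of_prefix hdropped h2
  rcases classify hm hm' hdm hcompat with ⟨hd0, hmm⟩ | ⟨h1', h2', h3'⟩
  · exact Or.inl ⟨by omega, hmm⟩
  · exact Or.inr ⟨h1', h2', by omega⟩

-- ---- find facts ----

lemma find_le_occ {s m : List Char} {j : Nat} (h : m <+: s.drop j) :
    0 ≤ PySem.Chars.find s m ∧ PySem.Chars.find s m ≤ (j : Int) := by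
  have hIn : PySem.Chars.isIn m s = true :=
    (PySem.Chars.exists_prefix_drop_iff_isIn m s).1 ⟨j, h⟩
  have hne : PySem.Chars.find s m ≠ -1 := by
    simpa [PySem.Chars.isIn, bne_iff_ne] using hIn
  have hge := PySem.Chars.neg_one_le_find s m
  have hnn : 0 ≤ PySem.Chars.find s m := by omega
  refine ⟨hnn, ?_⟩
  obtain ⟨_, hmin⟩ := PySem.Chars.find_spec hnn
  by_contra hlt
  exact hmin j (by omega) h

lemma find_str_eq (low m : String) :
    PySem.Str.find low m = PySem.Chars.find low.toList m.toList := PySem.Str.find_eq low m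

lemma occ_of_find {low m : String} (h : 0 ≤ PySem.Str.find low m) :
    m.toList <+: low.toList.drop (PySem.Str.find low m).toNat := by
  have h' : 0 ≤ PySem.Chars.find low.toList m.toList := by rw [← find_str_eq]; exact h
  have h2 := (PySem.Chars.find_spec h').1
  rw [← find_str_eq] at h2
  exact h2

-- ---- agreement of the two steps for every marker other than "this commit message" ----

lemma step_agree {low : String} {m : String} (hm : m ∈ pvMarkers)
    (hmt : m ≠ "this commit message") {c : Option Int} (hc : AccC low c) :
    bStep low c m = minStep low c m ∧ AccC low (bStep low c m) := by
  have hgood := markers_good m hm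
  have hne : m.toList ≠ [] := hgood.1
  have hlenm : (1 : Int) ≤ (m.toList.length : Int) := by
    exact_mod_cast List.length_pos_of_ne_nil hne
  have hlen_b : PySem.Str.len m = (m.toList.length : Int) := rfl
  by_cases h0 : PySem.Str.find low m = -1
  · have hb : bStep low c m = c := by
      simp only [bStep]
      rw [if_neg (by
        intro htrue
        rw [Bool.and_eq_true] at htrue
        exact (bne_iff_ne.1 htrue.1) h0)]
    have hmi : minStep low c m = c := by
      simp only [minStep]
      rw [if_pos h0]
    rw [hb, hmi]
    exact ⟨rfl, hc⟩
  · have hnn : 0 ≤ PySem.Str.find low m := by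
      have := PySem.Chars.neg_one_le_find low.toList m.toList
      rw [← find_str_eq] at this
      omega
    have hoccm := occ_of_find hnn
    cases c with
    | none =>
      have hb : bStep low none m = some (PySem.Str.find low m) := by
        simp only [bStep]
        rw [if_pos (by rw [Bool.and_eq_true]; exact ⟨bne_iff_ne.2 h0, rfl⟩)]
      have hmi : minStep low none m = some (PySem.Str.find low m) := by
        simp only [minStep]
        rw [if_neg h0]
      rw [hb, hmi]
      exact ⟨rfl, hnn, m, hm, rfl⟩
    | some v =>
      obtain ⟨hv, m', hm', hFm'⟩ := hc
      by_cases hfit : PySem.Str.find low m + PySem.Str.len m ≤ v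
      · have hb : bStep low (some v) m = some (PySem.Str.find low m) := by
          simp only [bStep]
          rw [if_pos (by rw [Bool.and_eq_true]; exact ⟨bne_iff_ne.2 h0, decide_eq_true hfit⟩)]
        have hlt : PySem.Str.find low m ≤ v := by
          rw [hlen_b] at hfit
          omega
        have hmi : minStep low (some v) m = some (PySem.Str.find low m) := by
          simp only [minStep]
          rw [if_neg h0, min_eq_right hlt]
        rw [hb, hmi]
        exact ⟨rfl, hnn, m, hm, rfl⟩
      · have hb : bStep low (some v) m = some v := by
          simp only [bStep]
          rw [if_neg (by
            intro htrue
            rw [Bool.and_eq_true] at htrue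
            exact hfit (of_decide_eq_true htrue.2))]
        have hvle : v ≤ PySem.Str.find low m := by
          by_contra hlt
          have hnn' : 0 ≤ PySem.Str.find low m' := by rw [hFm']; exact hv
          have hoccm' := occ_of_find hnn'
          rw [hFm'] at hoccm'
          rw [hlen_b] at hfit
          rcases occCL hm hm' (a := (PySem.Str.find low m).toNat) (b := v.toNat)
              (by omega) (by omega) hoccm hoccm' with ⟨hba, _⟩ | ⟨hmt', _, _⟩
          · omega
          · exact hmt hmt'
        have hmi : minStep low (some v) m = some v := by
          simp only [minStep]
          rw [if_neg h0, min_eq_left hvle]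
        rw [hb, hmi]
        exact ⟨rfl, hv, m', hm', hFm'⟩

lemma fold_agree {low : String} :
    ∀ (ms : List String), (∀ x ∈ ms, x ∈ pvMarkers ∧ x ≠ "this commit message") →
      ∀ (c : Option Int), AccC low c →
        List.foldl (bStep low) c ms = List.foldl (minStep low) c ms ∧
          AccC low (List.foldl (bStep low) c ms) := by
  intro ms
  induction ms with
  | nil => intro _ c hc; exact ⟨rfl, hc⟩
  | cons x xs ih =>
    intro hmem c hc
    obtain ⟨hstep, hacc⟩ := step_agree (hmem x (by simp)).1 (hmem x (by simp)).2 hc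
    rw [List.foldl_cons, List.foldl_cons, ← hstep]
    exact ih (fun y hy => hmem y (by simp [hy])) _ hacc

-- ---- the t-step: agree, or enter the lag state ----

lemma t_step {low : String} {c : Option Int} (hc : AccC low c) :
    (bStep low c tS = minStep low c tS ∧ AccC low (bStep low c tS)) ∨
    (∃ i : Nat, PySem.Str.find low tS = (i : Int) ∧ c = some ((i : Int) + 18) ∧
      bStep low c tS = some ((i : Int) + 18) ∧ minStep low c tS = some (i : Int) ∧
      ("explanation:".toList <+: low.toList.drop (i + 18) ∨
       "explanation of changes:".toList <+: low.toList.drop (i + 18))) := by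
  have hmT : tS ∈ pvMarkers := by decide
  have hlen_b : PySem.Str.len tS = 19 := rfl
  by_cases h0 : PySem.Str.find low tS = -1
  · left
    have hb : bStep low c tS = c := by
      simp only [bStep]
      rw [if_neg (by
        intro htrue
        rw [Bool.and_eq_true] at htrue
        exact (bne_iff_ne.1 htrue.1) h0)]
    have hmi : minStep low c tS = c := by
      simp only [minStep]
      rw [if_pos h0]
    rw [hb, hmi]
    exact ⟨rfl, hc⟩
  · have hnn : 0 ≤ PySem.Str.find low tS := by
      have := PySem.Chars.neg_one_le_find low.toList tS.toList
      rw [← find_str_eq] at this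
      omega
    have hoccm := occ_of_find hnn
    cases c with
    | none =>
      left
      have hb : bStep low none tS = some (PySem.Str.find low tS) := by
        simp only [bStep]
        rw [if_pos (by rw [Bool.and_eq_true]; exact ⟨bne_iff_ne.2 h0, rfl⟩)]
      have hmi : minStep low none tS = some (PySem.Str.find low tS) := by
        simp only [minStep]
        rw [if_neg h0]
      rw [hb, hmi]
      exact ⟨rfl, hnn, tS, hmT, rfl⟩
    | some v =>
      obtain ⟨hv, m', hm', hFm'⟩ := hc
      by_cases hfit : PySem.Str.find low tS + PySem.Str.len tS ≤ v
      · left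
        have hb : bStep low (some v) tS = some (PySem.Str.find low tS) := by
          simp only [bStep]
          rw [if_pos (by rw [Bool.and_eq_true]; exact ⟨bne_iff_ne.2 h0, decide_eq_true hfit⟩)]
        have hlt : PySem.Str.find low tS ≤ v := by
          rw [hlen_b] at hfit
          omega
        have hmi : minStep low (some v) tS = some (PySem.Str.find low tS) := by
          simp only [minStep]
          rw [if_neg h0, min_eq_right hlt]
        rw [hb, hmi]
        exact ⟨rfl, hnn, tS, hmT, rfl⟩
      · have hb : bStep low (some v) tS = some v := by
          simp only [bStep]
          rw [if_neg (by
            intro htrue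
            rw [Bool.and_eq_true] at htrue
            exact hfit (of_decide_eq_true htrue.2))]
        by_cases hvle : v ≤ PySem.Str.find low tS
        · left
          have hmi : minStep low (some v) tS = some v := by
            simp only [minStep]
            rw [if_neg h0, min_eq_left hvle]
          rw [hb, hmi]
          exact ⟨rfl, hv, m', hm', hFm'⟩
        · right
          have hlt : PySem.Str.find low tS < v := by omega
          have hnn' : 0 ≤ PySem.Str.find low m' := by rw [hFm']; exact hv
          have hoccm' := occ_of_find hnn'
          rw [hFm'] at hoccm'
          rw [hlen_b] at hfit
          have hlenT : tS.toList.length = 19 := rfl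
          rcases occCL hmT hm' (a := (PySem.Str.find low tS).toNat) (b := v.toNat)
              (by omega) (by rw [hlenT]; omega) hoccm hoccm' with ⟨hba, _⟩ | ⟨_, hme, hb18⟩
          · omega
          · refine ⟨(PySem.Str.find low tS).toNat, by omega, ?_, ?_, ?_, ?_⟩
            · have hv18 : v = ((PySem.Str.find low tS).toNat : Int) + 18 := by omega
              rw [hv18]
            · rw [hb]
              have hv18 : v = ((PySem.Str.find low tS).toNat : Int) + 18 := by omega
              rw [hv18]
            · have hmi : minStep low (some v) tS = some (PySem.Str.find low tS) := by
                simp only [minStep]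
                rw [if_neg h0, min_eq_right (le_of_lt hlt)]
              rw [hmi]
              congr 1
              omega
            · have hbv : v.toNat = (PySem.Str.find low tS).toNat + 18 := hb18
              rw [← hbv]
              rcases hme with h | h
              · left; rw [← h]; exact hoccm'
              · right; rw [← h]; exact hoccm'

-- ---- the lag state survives or converges on the two remaining markers ----

lemma lag_step {low : String} {m : String} (hm : m ∈ pvMarkers)
    (hmt : m ≠ "this commit message") (hme1 : m ≠ "explanation:")
    (hme2 : m ≠ "explanation of changes:") {i : Nat}
    (htf : PySem.Str.find low tS = (i : Int)) :
    (bStep low (some ((i : Int) + 18)) m = some ((i : Int) + 18) ∧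
      minStep low (some (i : Int)) m = some (i : Int) ∧
      (PySem.Str.find low m = -1 ∨ (i : Int) + 19 ≤ PySem.Str.find low m)) ∨
    (∃ u : Int, bStep low (some ((i : Int) + 18)) m = some u ∧
      minStep low (some (i : Int)) m = some u ∧ AccC low (some u)) := by
  have hmT : tS ∈ pvMarkers := by decide
  have hgood := markers_good m hm
  have hne : m.toList ≠ [] := hgood.1
  have hlenm : 1 ≤ m.toList.length := List.length_pos_of_ne_nil hne
  have hlen_b : PySem.Str.len m = (m.toList.length : Int) := rfl
  have hlenT : tS.toList.length = 19 := rfl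
  have htocc : tS.toList <+: low.toList.drop i := by
    have h := occ_of_find (low := low) (m := tS) (by rw [htf]; exact Int.natCast_nonneg i)
    rw [htf, Int.toNat_natCast] at h
    exact h
  by_cases h0 : PySem.Str.find low m = -1
  · left
    refine ⟨?_, ?_, Or.inl h0⟩
    · simp only [bStep]
      rw [if_neg (by
        intro htrue
        rw [Bool.and_eq_true] at htrue
        exact (bne_iff_ne.1 htrue.1) h0)]
    · simp only [minStep]
      rw [if_pos h0]
  · have hnn : 0 ≤ PySem.Str.find low m := by
      have := PySem.Chars.neg_one_le_find low.toList m.toList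
      rw [← find_str_eq] at this
      omega
    have hocc := occ_of_find hnn
    rcases Nat.lt_trichotomy (PySem.Str.find low m).toNat i with hfi | hfi | hfi
    · -- the occurrence lies strictly before i: it must end at or before i
      have hsmall : (PySem.Str.find low m).toNat + m.toList.length ≤ i := by
        by_contra hov
        rcases occCL hm hmT (a := (PySem.Str.find low m).toNat) (b := i)
            (by omega) (by omega) hocc htocc with ⟨hba, _⟩ | ⟨hmt', _, _⟩
        · omega
        · exact hmt hmt'
      right
      refine ⟨PySem.Str.find low m, ?_, ?_, hnn, m, hm, rfl⟩
      · simp only [bStep]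
        rw [if_pos (by
          rw [Bool.and_eq_true]
          refine ⟨bne_iff_ne.2 h0, decide_eq_true ?_⟩
          rw [hlen_b]
          omega)]
      · simp only [minStep]
        rw [if_neg h0, min_eq_right (by omega : PySem.Str.find low m ≤ (i : Int))]
    · exfalso
      rcases occCL hm hmT (a := (PySem.Str.find low m).toNat) (b := i)
          (by omega) (by omega) hocc htocc with ⟨_, hmm⟩ | ⟨hmt', _, _⟩
      · exact hmt hmm
      · exact hmt hmt'
    · have hbig : i + 19 ≤ (PySem.Str.find low m).toNat := by
        by_contra hlt
        rcases occCL hmT hm (a := i) (b := (PySem.Str.find low m).toNat)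
            (by omega) (by rw [hlenT]; omega) htocc hocc with ⟨hba, _⟩ | ⟨_, hme, _⟩
        · omega
        · rcases hme with h | h
          · exact hme1 h
          · exact hme2 h
      left
      refine ⟨?_, ?_, Or.inr (by omega)⟩
      · simp only [bStep]
        rw [if_neg (by
          intro htrue
          rw [Bool.and_eq_true] at htrue
          have hfit := of_decide_eq_true htrue.2
          rw [hlen_b] at hfit
          omega)]
      · simp only [minStep]
        rw [if_neg h0, min_eq_left (by omega : (i : Int) ≤ PySem.Str.find low m)]

-- ---- the min-fold value bounds every find it saw ----

lemma minfold_le {low : String} : ∀ (ms : List String) (c : Option Int) (v : Int),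
    List.foldl (minStep low) c ms = some v →
    (∀ m ∈ ms, PySem.Str.find low m = -1 ∨ v ≤ PySem.Str.find low m) ∧
      (∀ w : Int, c = some w → v ≤ w) := by
  intro ms
  induction ms with
  | nil =>
    intro c v h
    refine ⟨fun m hm => absurd hm List.not_mem_nil, fun w hw => ?_⟩
    rw [List.foldl_nil, hw] at h
    have : w = v := Option.some_inj.1 h
    omega
  | cons x xs ih =>
    intro c v h
    rw [List.foldl_cons] at h
    obtain ⟨hall, hcpart⟩ := ih (minStep low c x) v h
    by_cases h0 : PySem.Str.find low x = -1
    · have hms : minStep low c x = c := by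
        simp only [minStep]
        rw [if_pos h0]
      refine ⟨?_, fun w hw => hcpart w (by rw [hms, hw])⟩
      intro m hm
      rcases List.mem_cons.1 hm with rfl | hm'
      · exact Or.inl h0
      · exact hall m hm'
    · cases c with
      | none =>
        have hms : minStep low none x = some (PySem.Str.find low x) := by
          simp only [minStep]
          rw [if_neg h0]
        have hvx : v ≤ PySem.Str.find low x := hcpart _ hms
        refine ⟨?_, fun w hw => absurd hw (by simp)⟩
        intro m hm
        rcases List.mem_cons.1 hm with rfl | hm'
        · exact Or.inr hvx
        · exact hall m hm'
      | some w0 =>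
        have hms : minStep low (some w0) x = some (min w0 (PySem.Str.find low x)) := by
          simp only [minStep]
          rw [if_neg h0]
        have h1 := hcpart _ hms
        refine ⟨?_, ?_⟩
        · intro m hm
          rcases List.mem_cons.1 hm with rfl | hm'
          · exact Or.inr (le_trans h1 (min_le_right w0 _))
          · exact hall m hm'
        · intro w hw
          cases hw
          exact le_trans h1 (min_le_left w0 _)

-- ---- the min-fold is B's positions/min computation ----

def minAcc (c : Option Int) (l : List Int) : Option Int :=
  l.foldl (fun acc f => some (match acc with | none => f | some v => min v f)) c

lemma minStep_foldl (low : String) : ∀ (ms : List String) (c : Option Int),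
    List.foldl (minStep low) c ms =
      minAcc c ((ms.map (fun marker => PySem.Str.find low marker)).filter (fun p => p != -1)) := by
  intro ms
  induction ms with
  | nil => intro c; rfl
  | cons x xs ih =>
    intro c
    by_cases h0 : PySem.Str.find low x = -1
    · have hkeep : (PySem.Str.find low x != -1) = false := by
        rw [h0]
        exact bne_self_eq_false (-1 : Int)
      rw [List.foldl_cons, List.map_cons, List.filter_cons, hkeep]
      simp only [Bool.false_eq_true, if_false]
      have hms : minStep low c x = c := by
        simp only [minStep]
        rw [if_pos h0]
      rw [hms, ih]
    · have hkeep : (PySem.Str.find low x != -1) = true := bne_iff_ne.2 h0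
      rw [List.foldl_cons, List.map_cons, List.filter_cons, hkeep]
      simp only [if_true]
      have hms : minStep low c x =
          some (match c with | none => PySem.Str.find low x | some v => min v (PySem.Str.find low x)) := by
        simp only [minStep]
        rw [if_neg h0]
      rw [hms, ih]
      rfl

lemma minAcc_some : ∀ (t : List Int) (x : Int), minAcc (some x) t = some (t.foldl min x) := by
  intro t
  induction t with
  | nil => intro x; rfl
  | cons a t' ih =>
    intro x
    show minAcc (some (min x a)) t' = some ((a :: t').foldl min x)
    rw [ih, List.foldl_cons]

lemma min?_eq_minAcc : ∀ (l : List Int), PySem.List.min? l (fun p => p) = minAcc none l := by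
  intro l
  cases l with
  | nil => rfl
  | cons x t =>
    rw [PySem.List.min?_id_cons]
    show _ = minAcc (some x) t
    rw [minAcc_some]

lemma min?_eq_of {l : List Int} {v : Int} (hmem : v ∈ l) (hle : ∀ y ∈ l, v ≤ y) :
    PySem.List.min? l (fun p => p) = some v := by
  cases h : PySem.List.min? l (fun p => p) with
  | none =>
    rw [PySem.List.min?_eq_none_iff] at h
    rw [h] at hmem
    exact absurd hmem List.not_mem_nil
  | some u =>
    have hu : u ∈ l := PySem.List.min?_mem h
    have h1 : u ≤ v := PySem.List.min?_isMin h v hmem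
    have h2 : v ≤ u := hle u hu
    rw [show u = v by omega]

lemma alt_unfold (message : String) :
    explanatory_message_alt message =
      (match PySem.List.min?
          ((pvMarkers.map (fun marker => PySem.Str.find (PySem.Str.lower message) marker)).filter
            (fun p => p != -1)) (fun p => p) with
       | none => message
       | some c => PySem.Str.strip (PySem.Str.slice (PySem.Str.lower message) none (some c))) := rfl

-- ---- the lag state at the end of the fold implies D_ ----

lemma lag_implies_D {message : String} {i : Nat}
    (htf : PySem.Str.find (PySem.Str.lower message) tS = (i : Int))
    (hmagic : "explanation:".toList <+: (PySem.Str.lower message).toList.drop (i + 18) ∨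
      "explanation of changes:".toList <+: (PySem.Str.lower message).toList.drop (i + 18))
    (hfour : ∀ m ∈ fourM, PySem.Str.find (PySem.Str.lower message) m = -1 ∨
      (i : Int) + 18 ≤ PySem.Str.find (PySem.Str.lower message) m)
    (hih : PySem.Str.find (PySem.Str.lower message) "i hope this helps" = -1 ∨
      (i : Int) + 19 ≤ PySem.Str.find (PySem.Str.lower message) "i hope this helps")
    (hpl : PySem.Str.find (PySem.Str.lower message) "please let me know" = -1 ∨
      (i : Int) + 19 ≤ PySem.Str.find (PySem.Str.lower message) "please let me know") :
    D_explanatory_message message := by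
  have hLL : (PySem.Str.lower message).toList = PySem.Chars.lower message.toList :=
    PySem.Str.toList_lower message
  have hbr : ∀ m : String, PySem.Str.find (PySem.Str.lower message) m =
      PySem.Chars.find (PySem.Chars.lower message.toList) m.toList := by
    intro m
    rw [find_str_eq, hLL]
  have hFt : PySem.Chars.find (PySem.Chars.lower message.toList)
      ("this commit message".toList) = (i : Int) := by
    have h := htf
    rw [hbr] at h
    exact h
  have htocc : tS.toList <+: (PySem.Chars.lower message.toList).drop i := by
    have h := occ_of_find (low := PySem.Str.lower message) (m := tS)
      (by rw [htf]; exact Int.natCast_nonneg i)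
    rw [htf, Int.toNat_natCast, hLL] at h
    exact h
  rw [hLL] at hmagic
  refine ⟨by rw [hFt]; exact Int.natCast_nonneg i, ?_, ?_⟩
  · rw [hFt, Int.toNat_natCast]
    have h18 : (18 : Nat) ≤ tS.toList.length := by decide
    rcases hmagic with h | h
    · left
      have heq : "this commit messagexplanation:".toList =
          tS.toList.take 18 ++ "explanation:".toList := by decide
      rw [heq]
      exact prefix_take_append 18 htocc h18 (by rw [List.drop_drop]; exact h)
    · right
      have heq : "this commit messagexplanation of changes:".toList =
          tS.toList.take 18 ++ "explanation of changes:".toList := by decide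
      rw [heq]
      exact prefix_take_append 18 htocc h18 (by rw [List.drop_drop]; exact h)
  · intro m hm
    fin_cases hm
    · rcases hfour "explanation:" (by decide) with h | h
      · left; rw [hbr] at h; exact h
      · right
        rw [hbr] at h
        rw [hFt, show ("explanation:".toList.length) = 12 from rfl]
        omega
    · rcases hfour "explanation of changes:" (by decide) with h | h
      · left; rw [hbr] at h; exact h
      · right
        rw [hbr] at h
        rw [hFt, show ("explanation of changes:".toList.length) = 23 from rfl]
        omega
    · rcases hfour "note:" (by decide) with h | h
      · left; rw [hbr] at h; exact h
      · right
        rw [hbr] at h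
        rw [hFt, show ("note:".toList.length) = 5 from rfl]
        omega
    · rcases hfour "notes:" (by decide) with h | h
      · left; rw [hbr] at h; exact h
      · right
        rw [hbr] at h
        rw [hFt, show ("notes:".toList.length) = 6 from rfl]
        omega
    · right
      rw [hFt, show ("this commit message".toList.length) = 19 from rfl]
      omega
    · rcases hih with h | h
      · left; rw [hbr] at h; exact h
      · right
        rw [hbr] at h
        rw [hFt, show ("i hope this helps".toList.length) = 17 from rfl]
        omega
    · rcases hpl with h | h
      · left; rw [hbr] at h; exact h
      · right
        rw [hbr] at h
        rw [hFt, show ("please let me know".toList.length) = 18 from rfl]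
        omega

-- ---- find facts inside D_ ----

lemma finds_in_D {message : String} {i : Nat}
    (hFt0 : PySem.Chars.find (PySem.Chars.lower message.toList)
      ("this commit message".toList) = (i : Int))
    (hmagic : "this commit messagexplanation:".toList <+: (PySem.Chars.lower message.toList).drop i ∨
      "this commit messagexplanation of changes:".toList <+: (PySem.Chars.lower message.toList).drop i)
    (hcl : ∀ m ∈ pvMarkers, PySem.Chars.find (PySem.Chars.lower message.toList) m.toList = -1 ∨
      PySem.Chars.find (PySem.Chars.lower message.toList) ("this commit message".toList) + 18 <
        PySem.Chars.find (PySem.Chars.lower message.toList) m.toList + (m.toList.length : Int)) :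
    PySem.Str.find (PySem.Str.lower message) tS = (i : Int) ∧
    (if "this commit messagexplanation:".toList <+: (PySem.Chars.lower message.toList).drop i
      then PySem.Str.find (PySem.Str.lower message) "explanation:" = (i : Int) + 18
      else PySem.Str.find (PySem.Str.lower message) "explanation of changes:" = (i : Int) + 18) ∧
    (∀ m ∈ pvMarkers, m ≠ tS → PySem.Str.find (PySem.Str.lower message) m = -1 ∨
      (i : Int) + 18 ≤ PySem.Str.find (PySem.Str.lower message) m) := by
  have hmT : tS ∈ pvMarkers := by decide
  have hLL : (PySem.Str.lower message).toList = PySem.Chars.lower message.toList :=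
    PySem.Str.toList_lower message
  have hbr : ∀ m : String, PySem.Str.find (PySem.Str.lower message) m =
      PySem.Chars.find (PySem.Chars.lower message.toList) m.toList := by
    intro m
    rw [find_str_eq, hLL]
  set L := PySem.Chars.lower message.toList with hLdef
  have htocc : tS.toList <+: L.drop i := by
    rcases hmagic with h | h
    · exact List.IsPrefix.trans (by decide) h
    · exact List.IsPrefix.trans (by decide) h
  have hFt : PySem.Chars.find L tS.toList = (i : Int) := hFt0
  -- every marker other than t has find -1 or ≥ i + 18
  have hother : ∀ m ∈ pvMarkers, m ≠ tS → PySem.Chars.find L m.toList = -1 ∨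
      (i : Int) + 18 ≤ PySem.Chars.find L m.toList := by
    intro m hm hmt
    by_cases h0 : PySem.Chars.find L m.toList = -1
    · exact Or.inl h0
    · right
      have hge := PySem.Chars.neg_one_le_find L m.toList
      have hnn : 0 ≤ PySem.Chars.find L m.toList := by omega
      have hocc := (PySem.Chars.find_spec hnn).1
      have hNEm : (i : Int) + 18 < PySem.Chars.find L m.toList + (m.toList.length : Int) := by
        rcases hcl m hm with h | h
        · exact absurd h h0
        · rw [hFt0] at h
          exact h
      have hlen1 : 1 ≤ m.toList.length := List.length_pos_of_ne_nil (markers_good m hm).1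
      set f := (PySem.Chars.find L m.toList).toNat with hfdef
      rcases Nat.lt_trichotomy f i with h1 | h1 | h1
      · exfalso
        rcases occCL hm hmT (a := f) (b := i) (by omega) (by omega) hocc htocc with
          ⟨hba, _⟩ | ⟨hmt2, _, _⟩
        · omega
        · exact hmt hmt2
      · exfalso
        rcases occCL hm hmT (a := f) (b := i) (by omega) (by omega) hocc htocc with
          ⟨_, hmm⟩ | ⟨hmt2, _, _⟩
        · exact hmt hmm
        · exact hmt hmt2
      · by_contra hlt
        have hf18 : f < i + 18 := by omega
        rcases occCL hmT hm (a := i) (b := f) (by omega)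
            (by rw [show (tS.toList).length = 19 from rfl]; omega) htocc hocc with
          ⟨hba, _⟩ | ⟨_, _, hb18⟩
        · omega
        · omega
  refine ⟨by rw [hbr]; exact hFt, ?_, ?_⟩
  · -- the matching explanation marker has find i + 18
    by_cases hcase : "this commit messagexplanation:".toList <+: L.drop i
    · rw [if_pos hcase]
      have heocc : "explanation:".toList <+: L.drop (i + 18) := by
        obtain ⟨u, hu⟩ := hcase
        refine ⟨u, ?_⟩
        have h3 : (L.drop i).drop 18 = "explanation:".toList ++ u := by
          rw [← hu, List.drop_append_of_le_length (by decide),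
            show "this commit messagexplanation:".toList.drop 18 = "explanation:".toList from by decide]
        rw [List.drop_drop] at h3
        exact h3.symm
      obtain ⟨hf0, hfle⟩ := find_le_occ heocc
      rcases hother "explanation:" (by decide) (by decide) with h | h
      · omega
      · rw [hbr]
        omega
    · rw [if_neg hcase]
      have hm2 : "this commit messagexplanation of changes:".toList <+: L.drop i := by
        rcases hmagic with h | h
        · exact absurd h hcase
        · exact h
      have heocc : "explanation of changes:".toList <+: L.drop (i + 18) := by
        obtain ⟨u, hu⟩ := hm2
        refine ⟨u, ?_⟩
        have h3 : (L.drop i).drop 18 = "explanation of changes:".toList ++ u := by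
          rw [← hu, List.drop_append_of_le_length (by decide),
            show "this commit messagexplanation of changes:".toList.drop 18 = "explanation of changes:".toList from by decide]
        rw [List.drop_drop] at h3
        exact h3.symm
      obtain ⟨hf0, hfle⟩ := find_le_occ heocc
      rcases hother "explanation of changes:" (by decide) (by decide) with h | h
      · omega
      · rw [hbr]
        omega
  · intro m hm hmt
    rw [hbr]
    exact hother m hm hmt

-- ---- the two results differ when the cuts are i + 18 and i ----

lemma strip_take_ne {L : List Char} {i : Nat} (h : tS.toList <+: L.drop i) :
    PySem.Chars.strip (L.take (i + 18)) ≠ PySem.Chars.strip (L.take i) := by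
  obtain ⟨u, hu⟩ := h
  have hQ : (L.drop i).take 18 = "this commit messag".toList := by
    rw [← hu, List.take_append_of_le_length (by decide)]
    decide
  have hsplit : L.take (i + 18) = L.take i ++ "this commit messag".toList := by
    rw [List.take_add, hQ]
  set Q := "this commit messag".toList with hQdef
  set P := L.take i with hPdef
  rw [hsplit]
  have hWall : ∀ c ∈ P.takeWhile PySem.Chars.isspace, PySem.Chars.isspace c = true :=
    fun c hc => List.mem_takeWhile_imp hc
  have hPWR : P = P.takeWhile PySem.Chars.isspace ++ P.dropWhile PySem.Chars.isspace :=
    (List.takeWhile_append_dropWhile).symm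
  by_cases hRnil : P.dropWhile PySem.Chars.isspace = []
  · have hPall : ∀ c ∈ P, PySem.Chars.isspace c = true := by
      intro c hc
      rw [hPWR, hRnil, List.append_nil] at hc
      exact hWall c hc
    have h1 : PySem.Chars.strip (P ++ Q) = PySem.Chars.strip Q := strip_ws_append hPall
    have h2 : PySem.Chars.strip Q = Q := by decide
    have h3 : PySem.Chars.strip P = [] := by
      rw [strip_eq, hRnil]
      rfl
    rw [h1, h2, h3]
    decide
  · have hdw : (P.dropWhile PySem.Chars.isspace ++ Q).dropWhile PySem.Chars.isspace =
        P.dropWhile PySem.Chars.isspace ++ Q := by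
      cases hc : P.dropWhile PySem.Chars.isspace with
      | nil => exact absurd hc hRnil
      | cons a b =>
        have ha : PySem.Chars.isspace a = false := by
          have hh := head_not_ws_of_dropWhile (t := P) hRnil
          rw [hc] at hh
          exact hh
        rw [List.cons_append, List.dropWhile_cons, ha]
        simp
    have hrs : PySem.Chars.rstrip (P.dropWhile PySem.Chars.isspace ++ Q) =
        P.dropWhile PySem.Chars.isspace ++ Q := by
      unfold PySem.Chars.rstrip
      rw [List.reverse_append]
      have hQr : Q.reverse.dropWhile PySem.Chars.isspace = Q.reverse := by decide
      have hstep : (Q.reverse ++ (P.dropWhile PySem.Chars.isspace).reverse).dropWhile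
          PySem.Chars.isspace = Q.reverse ++ (P.dropWhile PySem.Chars.isspace).reverse := by
        rw [show Q.reverse = 'g' :: "assem timmoc siht".toList from by decide]
        rw [List.cons_append, List.dropWhile_cons,
          show PySem.Chars.isspace 'g' = false from by decide]
        simp
      rw [hstep, List.reverse_append, List.reverse_reverse, List.reverse_reverse]
    have h1 : PySem.Chars.strip (P ++ Q) = P.dropWhile PySem.Chars.isspace ++ Q := by
      conv_lhs => rw [hPWR]
      rw [List.append_assoc, strip_ws_append hWall, strip_eq, hdw, hrs]
    have h2 : PySem.Chars.strip P = PySem.Chars.rstrip (P.dropWhile PySem.Chars.isspace) :=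
      strip_eq P
    have hlen : (PySem.Chars.rstrip (P.dropWhile PySem.Chars.isspace)).length ≤
        (P.dropWhile PySem.Chars.isspace).length :=
      (rstrip_sublist _).length_le
    intro hEq
    rw [h1, h2] at hEq
    have hlenEq := congrArg List.length hEq
    rw [List.length_append, show Q.length = 18 from rfl] at hlenEq
    omega

-- ---- core dichotomy assembly ----

lemma invState_slice {message : String} {c : Int} (hc : 0 ≤ c) :
    invState message (some c) =
      PySem.Str.strip (PySem.Str.slice (PySem.Str.lower message) none (some c)) := by
  simp only [invState]
  unfold PySem.Str.strip PySem.Str.slice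
  rw [String.toList_ofList, PySem.Str.toList_lower, PySem.Chars.slice_eq_listSlice,
    PySem.List.slice_to _ hc]

lemma unchanged_main {message : String} (hD : ¬ D_explanatory_message message) :
    List.foldl (bStep (PySem.Str.lower message)) none pvMarkers =
      List.foldl (minStep (PySem.Str.lower message)) none pvMarkers := by
  set low := PySem.Str.lower message with hlowd
  rw [pvSplit, List.foldl_append, List.foldl_append]
  obtain ⟨h4, hacc4⟩ := fold_agree (low := low) fourM (by decide) none trivial
  rw [← h4]
  set c4 := List.foldl (bStep low) none fourM with hc4d
  rw [List.foldl_cons (f := bStep low), List.foldl_cons (f := minStep low)]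
  rcases t_step hacc4 with ⟨hstep, hacc5⟩ | ⟨i, htf, hc4eq, hbs, hms, hmagic⟩
  · rw [← hstep]
    exact (fold_agree ["i hope this helps", "please let me know"] (by decide) _ hacc5).1
  · rw [hbs, hms, List.foldl_cons (f := bStep low), List.foldl_cons (f := minStep low)]
    rcases lag_step (m := "i hope this helps") (by decide) (by decide) (by decide) (by decide)
        htf with ⟨hb1, hm1, hihF⟩ | ⟨u, hb1, hm1, hacc1⟩
    · rw [hb1, hm1, List.foldl_cons (f := bStep low), List.foldl_cons (f := minStep low)]
      rcases lag_step (m := "please let me know") (by decide) (by decide) (by decide) (by decide)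
          htf with ⟨hb2, hm2, hplF⟩ | ⟨u, hb2, hm2, hacc2⟩
      · exfalso
        apply hD
        refine lag_implies_D htf hmagic ?_ hihF hplF
        have h4v : List.foldl (minStep low) none fourM = some ((i : Int) + 18) := by
          rw [← h4]
          exact hc4eq
        exact fun m hm => (minfold_le fourM none ((i : Int) + 18) h4v).1 m hm
      · rw [hb2, hm2]
        rfl
    · rw [hb1, hm1]
      exact (fold_agree ["please let me know"] (by decide) _ hacc1).1

lemma changed_main {message : String} (hD : D_explanatory_message message) :
    explanatory_message message ≠ explanatory_message_alt message := by
  obtain ⟨hf0, hmagic, hcl⟩ := hD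
  obtain ⟨i, hi⟩ : ∃ i : Nat, PySem.Chars.find (PySem.Chars.lower message.toList)
      ("this commit message".toList) = (i : Int) :=
    ⟨(PySem.Chars.find (PySem.Chars.lower message.toList) "this commit message".toList).toNat,
      (Int.toNat_of_nonneg hf0).symm⟩
  rw [hi, Int.toNat_natCast] at hmagic
  obtain ⟨hFt, hFe, hother⟩ := finds_in_D hi hmagic hcl
  have hmT : tS ∈ pvMarkers := by decide
  -- B's minimum over all recorded positions is i
  have hBmin : PySem.List.min?
      ((pvMarkers.map (fun marker => PySem.Str.find (PySem.Str.lower message) marker)).filter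
        (fun p => p != -1)) (fun p => p) = some (i : Int) := by
    apply min?_eq_of
    · refine List.mem_filter.2 ⟨List.mem_map.2 ⟨tS, hmT, hFt⟩, ?_⟩
      rw [bne_iff_ne]
      omega
    · intro y hy
      obtain ⟨hy1, hy2⟩ := List.mem_filter.1 hy
      obtain ⟨m, hmpv, hme⟩ := List.mem_map.1 hy1
      have hyne := bne_iff_ne.1 hy2
      by_cases hmt : m = tS
      · rw [hmt, hFt] at hme
        omega
      · rcases hother m hmpv hmt with h | h
        · rw [h] at hme
          omega
        · rw [hme] at h
          omega
  -- the four-marker prefix of A's fold reaches i + 18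
  obtain ⟨h4, hacc4⟩ := fold_agree (low := PySem.Str.lower message) fourM (by decide) none trivial
  have h4sub : ∀ x ∈ fourM, x ∈ pvMarkers ∧ x ≠ tS := by decide
  have h4v : List.foldl (minStep (PySem.Str.lower message)) none fourM =
      some ((i : Int) + 18) := by
    rw [minStep_foldl, ← min?_eq_minAcc]
    apply min?_eq_of
    · by_cases hc1 : "this commit messagexplanation:".toList <+:
          (PySem.Chars.lower message.toList).drop i
      · rw [if_pos hc1] at hFe
        refine List.mem_filter.2 ⟨List.mem_map.2 ⟨"explanation:", by decide, hFe⟩, ?_⟩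
        rw [bne_iff_ne]
        omega
      · rw [if_neg hc1] at hFe
        refine List.mem_filter.2 ⟨List.mem_map.2 ⟨"explanation of changes:", by decide, hFe⟩, ?_⟩
        rw [bne_iff_ne]
        omega
    · intro y hy
      obtain ⟨hy1, hy2⟩ := List.mem_filter.1 hy
      obtain ⟨m, hmf, hme⟩ := List.mem_map.1 hy1
      have hyne := bne_iff_ne.1 hy2
      rcases hother m (h4sub m hmf).1 (h4sub m hmf).2 with h | h
      · rw [h] at hme
        omega
      · rw [hme] at h
        omega
  -- A's full fold is stuck at i + 18
  have hA : List.foldl (bStep (PySem.Str.lower message)) none pvMarkers =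
      some ((i : Int) + 18) := by
    rw [pvSplit, List.foldl_append, h4, h4v, List.foldl_cons]
    have hlenT : PySem.Str.len tS = 19 := rfl
    have hbt : bStep (PySem.Str.lower message) (some ((i : Int) + 18)) tS =
        some ((i : Int) + 18) := by
      simp only [bStep]
      rw [if_neg (by
        intro htrue
        rw [Bool.and_eq_true] at htrue
        have hf := of_decide_eq_true htrue.2
        rw [hFt, hlenT] at hf
        omega)]
    rw [hbt]
    have hkeep : ∀ m ∈ pvMarkers, m ≠ tS →
        bStep (PySem.Str.lower message) (some ((i : Int) + 18)) m = some ((i : Int) + 18) := by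
      intro m hm hmt
      have hlen_b : PySem.Str.len m = (m.toList.length : Int) := rfl
      have hlen1 : 1 ≤ m.toList.length := List.length_pos_of_ne_nil (markers_good m hm).1
      simp only [bStep]
      rw [if_neg (by
        intro htrue
        rw [Bool.and_eq_true] at htrue
        have hne0 := bne_iff_ne.1 htrue.1
        have hf := of_decide_eq_true htrue.2
        rcases hother m hm hmt with h | h
        · exact hne0 h
        · rw [hlen_b] at hf
          omega)]
    rw [List.foldl_cons, hkeep "i hope this helps" (by decide) (by decide),
      List.foldl_cons, hkeep "please let me know" (by decide) (by decide)]
    rfl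
  have htocc : tS.toList <+: (PySem.Chars.lower message.toList).drop i := by
    rcases hmagic with h | h
    · exact List.IsPrefix.trans (by decide) h
    · exact List.IsPrefix.trans (by decide) h
  obtain ⟨heq, hok⟩ := fold_main message pvMarkers markers_good none trivial
  have hstart : invState message none = message := rfl
  rw [hstart] at heq
  rw [a_unfold, alt_unfold, heq, hA, hBmin]
  show invState message (some ((i : Int) + 18)) ≠
    PySem.Str.strip (PySem.Str.slice (PySem.Str.lower message) none (some (i : Int)))
  rw [← invState_slice (Int.natCast_nonneg i)]
  simp only [invState]
  intro hEq
  apply strip_take_ne htocc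
  have h1 := congrArg String.toList hEq
  rw [String.toList_ofList, String.toList_ofList] at h1
  rw [show ((i : Int) + 18).toNat = i + 18 from by omega, Int.toNat_natCast] at h1
  exact h1

-- ===== VERDICT (by name: the statements are the Claim_ definitions above) =====
theorem explanatory_message_spec : Claim_unchanged_explanatory_message := by
  unfold Claim_unchanged_explanatory_message Spec_explanatory_message
  intro message _ hD
  obtain ⟨heq, hok⟩ := fold_main message pvMarkers markers_good none trivial
  have hstart : invState message none = message := rfl
  rw [hstart] at heq
  have hmin : List.foldl (bStep (PySem.Str.lower message)) none pvMarkers =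
      PySem.List.min?
        ((pvMarkers.map (fun marker => PySem.Str.find (PySem.Str.lower message) marker)).filter
          (fun p => p != -1)) (fun p => p) := by
    rw [unchanged_main hD, minStep_foldl, min?_eq_minAcc]
  rw [a_unfold, alt_unfold, heq, hmin]
  cases hfb : PySem.List.min?
      ((pvMarkers.map (fun marker => PySem.Str.find (PySem.Str.lower message) marker)).filter
        (fun p => p != -1)) (fun p => p) with
  | none => rfl
  | some c =>
    rw [hmin, hfb] at hok
    have hc : 0 ≤ c := hok
    show invState message (some c) =
      PySem.Str.strip (PySem.Str.slice (PySem.Str.lower message) none (some c))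
    simp only [invState]
    unfold PySem.Str.strip PySem.Str.slice
    rw [String.toList_ofList, PySem.Str.toList_lower, PySem.Chars.slice_eq_listSlice,
      PySem.List.slice_to _ hc]

set_option maxRecDepth 100000 in
theorem explanatory_message_changed : Claim_changed_explanatory_message := by
  unfold Claim_changed_explanatory_message
  decide

theorem explanatory_message_tight : Claim_exact_explanatory_message := by
  unfold Claim_exact_explanatory_message
  intro message _ hD
  exact changed_main hD
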